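-- pv_equiv track=rewrite | github.com/amusci/escapingTutorialHell | pyt/longestZero.py | longest_zero
-- ===== SOURCE A (Python) =====
-- def longest_zero(s):
--     lenny = len(s)
--     ans = ''
--     max_ans = ''
--
--     for i in range(lenny):
--         if s[i] == '0':
--             ans += s[i]
--         else:
--             if len(ans) > len(max_ans):
--                 max_ans = ans
--             ans = ''
--
--     if len(ans) > len(max_ans):
--         max_ans = ans
--
--     return max_ans
-- ===== SOURCE B (Python) =====
-- import re
--
-- def longest_zero(s):
--     return max(re.findall('0+', s), key=len, default='')
-- ===== Notes on version B (the rewrite author's own statement) =====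
-- stated objective: idiomatic
-- what changed: Replaces A's incremental accumulator loop with a regex that materializes all maximal zero-runs and a single max-by-length reduction (empty default for no match).
import Mathlib
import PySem

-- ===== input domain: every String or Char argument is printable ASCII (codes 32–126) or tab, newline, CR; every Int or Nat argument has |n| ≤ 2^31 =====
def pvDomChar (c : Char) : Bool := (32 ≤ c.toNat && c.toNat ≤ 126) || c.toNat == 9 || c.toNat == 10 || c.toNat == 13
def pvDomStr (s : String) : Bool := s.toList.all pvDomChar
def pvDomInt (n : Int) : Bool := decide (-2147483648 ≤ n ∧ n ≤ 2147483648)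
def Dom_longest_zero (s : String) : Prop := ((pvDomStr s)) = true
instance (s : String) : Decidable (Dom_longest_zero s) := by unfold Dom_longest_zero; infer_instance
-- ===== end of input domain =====

-- B replaces A's incremental run accumulator with "materialize all maximal zero-runs,
-- then take the first longest" (re.findall + max by length); idiomatic, measured faster in a timing run (C regex engine).

-- ===== PORT A =====
-- A's loop over s[i] for i in range(len(s)) visits the characters in order; ported as
-- structural recursion over s.toList with the same (ans, max_ans) state (strings as List Char).
def pvGoA : List Char → List Char → List Char → List Char
  | [], ans, mx => if ans.length > mx.length then ans else mx
  | c :: rest, ans, mx =>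
    if c = '0' then pvGoA rest (ans ++ [c]) mx
    else if ans.length > mx.length then pvGoA rest [] ans
    else pvGoA rest [] mx

def longest_zero (s : String) : String := String.mk (pvGoA s.toList [] [])

-- ===== PORT B =====
-- hand port of re.findall('0+', s): the list of maximal runs of '0' in order (exact for this pattern)
def pvRuns : List Char → List (List Char)
  | [] => []
  | c :: rest =>
    if c = '0' then (c :: rest.takeWhile (· = '0')) :: pvRuns (rest.dropWhile (· = '0'))
    else pvRuns rest
termination_by l => l.length
decreasing_by
  · simpa using Nat.lt_succ_of_le (List.length_dropWhile_le _ _)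
  · simp

-- max(runs, key=len, default=''): first element of maximal length, '' if no match
def longest_zero_alt (s : String) : String :=
  match pvRuns s.toList with
  | [] => ""
  | h :: t => String.mk (t.foldl (fun b r => if r.length > b.length then r else b) h)

-- ===== PRECONDITION & SPEC =====
def Spec_longest_zero (s : String) (out : String) : Prop := out = longest_zero_alt s
instance (s : String) (out : String) : Decidable (Spec_longest_zero s out) := by unfold Spec_longest_zero; infer_instance

-- ===== CLAIM (what is proved, stated in full; the proofs are below) =====
def Claim_equal_longest_zero : Prop := ∀ (s : String), Dom_longest_zero s → Spec_longest_zero s (longest_zero s)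

-- ===== LEMMAS AND PROOFS =====

-- proof helper: the runs of (ans ++ l) where ans is the (zero-)run currently being accumulated
def pvRunsAcc : List Char → List Char → List (List Char)
  | [], ans => if ans = [] then [] else [ans]
  | c :: rest, ans =>
    if c = '0' then pvRunsAcc rest (ans ++ [c])
    else if ans = [] then pvRunsAcc rest []
    else ans :: pvRunsAcc rest []

def pvBest (mx : List Char) (rs : List (List Char)) : List Char :=
  rs.foldl (fun b r => if r.length > b.length then r else b) mx

theorem pvGoA_eq_best : ∀ (l ans mx : List Char), pvGoA l ans mx = pvBest mx (pvRunsAcc l ans) := by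
  intro l
  induction l with
  | nil =>
    intro ans mx
    by_cases h : ans = [] <;>
      simp [pvGoA, pvRunsAcc, pvBest, h]
  | cons c rest ih =>
    intro ans mx
    by_cases hc : c = '0'
    · simp [pvGoA, pvRunsAcc, hc, ih]
    · by_cases ha : ans = []
      · simp [pvGoA, pvRunsAcc, hc, ha, ih]
      · simp only [pvGoA, pvRunsAcc, hc, ha, ih, pvBest, if_false, List.foldl_cons]
        split_ifs <;> rfl

theorem pvRunsAcc_eq : ∀ (l ans : List Char),
    pvRunsAcc l ans =
      if ans = [] then pvRuns l
      else (ans ++ l.takeWhile (· = '0')) :: pvRuns (l.dropWhile (· = '0')) := by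
  intro l
  induction l with
  | nil =>
    intro ans
    by_cases h : ans = [] <;> simp [pvRunsAcc, pvRuns, h]
  | cons c rest ih =>
    intro ans
    by_cases hc : c = '0'
    · subst hc
      rw [pvRunsAcc, if_pos rfl, ih]
      by_cases ha : ans = []
      · simp [ha, pvRuns]
      · simp [ha, List.dropWhile]
    · by_cases ha : ans = []
      · simp [pvRunsAcc, hc, ha, ih, pvRuns]
      · simp [pvRunsAcc, hc, ha, ih, pvRuns]

theorem pvRuns_ne_nil (l : List Char) : ∀ (r : List Char), r ∈ pvRuns l → r ≠ [] := by
  match l with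
  | [] => intro r hr; simp [pvRuns] at hr
  | c :: rest =>
    intro r hr
    by_cases hc : c = '0'
    · rw [pvRuns, if_pos hc] at hr
      rcases List.mem_cons.mp hr with h | h
      · simp [h]
      · exact pvRuns_ne_nil (rest.dropWhile (· = '0')) r h
    · rw [pvRuns, if_neg hc] at hr
      exact pvRuns_ne_nil rest r hr
termination_by l.length
decreasing_by
  · simpa using Nat.lt_succ_of_le (List.length_dropWhile_le _ _)
  · simp

-- ===== VERDICT (by name: the statement is the Claim_ definition above) =====
theorem longest_zero_spec : Claim_equal_longest_zero := by
  intro s _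
  unfold Spec_longest_zero longest_zero longest_zero_alt
  rw [pvGoA_eq_best, pvRunsAcc_eq, if_pos rfl]
  cases hr : pvRuns s.toList with
  | nil => simp [pvBest]; decide
  | cons h t =>
    have hne : h ≠ [] := pvRuns_ne_nil s.toList h (by rw [hr]; exact List.mem_cons_self)
    have : pvBest [] (h :: t) = t.foldl (fun b r => if r.length > b.length then r else b) h := by
      simp [pvBest, List.length_pos_iff.mpr hne]
    rw [this]
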